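-- pv_equiv track=rewrite | github.com/adrirobg/cortex-mcp | tools/architect/mission_map.py | _prioritize_tdd_workflow
-- ===== SOURCE A (Python) =====
-- from typing import List, Dict, Optional, Set, Tuple, Any
--
-- def _prioritize_tdd_workflow(ready_tasks: List[str]) -> List[str]:
--     """Prioritize tasks within TDD workflow constraints.
--
--     Args:
--         ready_tasks: Tasks that are ready to execute
--
--     Returns:
--         Prioritized list following TDD workflow principles
--     """
--     # Separate test and implementation tasks
--     test_tasks = [task_id for task_id in ready_tasks if task_id.startswith("test_")]
--     impl_tasks = [task_id for task_id in ready_tasks if not task_id.startswith("test_")]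
--
--     prioritized = []
--
--     # Process test tasks first (TDD Red phase)
--     test_tasks.sort()  # Alphabetical order for consistency
--     prioritized.extend(test_tasks)
--
--     # Then implementation tasks (TDD Green phase)
--     impl_tasks.sort()  # Alphabetical order for consistency
--     prioritized.extend(impl_tasks)
--
--     return prioritized
-- ===== SOURCE B (Python) =====
-- def _prioritize_tdd_workflow(ready_tasks):
--     """One stable keyed sort: test_ tasks first (False < True), alphabetical within each group."""
--     return sorted(ready_tasks, key=lambda t: (not t.startswith("test_"), t))
-- ===== Notes on version B (the rewrite author's own statement) =====
-- stated objective: simpler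
-- what changed: Replaced the partition-into-two-lists-then-sort-each-then-concatenate with a single stable sort on the composite key (not t.startswith('test_'), t).
import Mathlib
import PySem

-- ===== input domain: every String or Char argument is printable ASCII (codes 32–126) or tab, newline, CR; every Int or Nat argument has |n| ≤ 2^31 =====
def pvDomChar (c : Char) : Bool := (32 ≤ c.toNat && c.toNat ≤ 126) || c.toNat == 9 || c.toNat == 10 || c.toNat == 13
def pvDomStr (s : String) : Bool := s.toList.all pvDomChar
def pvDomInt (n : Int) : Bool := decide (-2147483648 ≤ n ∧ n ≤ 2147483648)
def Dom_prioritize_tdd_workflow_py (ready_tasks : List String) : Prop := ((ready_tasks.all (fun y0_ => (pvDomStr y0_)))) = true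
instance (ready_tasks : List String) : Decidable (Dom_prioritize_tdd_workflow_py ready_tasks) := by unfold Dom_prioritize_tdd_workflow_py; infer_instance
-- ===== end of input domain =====

-- ===== PORT A =====
-- B replaces A's partition-then-sort-each-then-concatenate by one stable keyed sort (objective: simpler).
def prioritize_tdd_workflow_py (ready_tasks : List String) : List String :=
  let test_tasks := ready_tasks.filter (fun task_id => PySem.Str.startswith task_id "test_")
  let impl_tasks := ready_tasks.filter (fun task_id => !(PySem.Str.startswith task_id "test_"))
  let prioritized : List String := []
  let test_tasks := PySem.List.sorted test_tasks (fun x => x)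
  let prioritized := prioritized ++ test_tasks
  let impl_tasks := PySem.List.sorted impl_tasks (fun x => x)
  let prioritized := prioritized ++ impl_tasks
  prioritized

-- ===== PORT B =====
def prioritize_tdd_workflow_py_alt (ready_tasks : List String) : List String :=
  PySem.List.sorted2 ready_tasks (fun t => !(PySem.Str.startswith t "test_")) (fun t => t)

-- ===== PRECONDITION & SPEC =====
def Spec_prioritize_tdd_workflow_py (ready_tasks : List String) (out : List String) : Prop := out = prioritize_tdd_workflow_py_alt ready_tasks
instance (ready_tasks : List String) (out : List String) : Decidable (Spec_prioritize_tdd_workflow_py ready_tasks out) := by unfold Spec_prioritize_tdd_workflow_py; infer_instance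

-- ===== CLAIM (what is proved, stated in full; the proofs are below) =====
def Claim_equal_prioritize_tdd_workflow_py : Prop := ∀ (ready_tasks : List String), Dom_prioritize_tdd_workflow_py ready_tasks → Spec_prioritize_tdd_workflow_py ready_tasks (prioritize_tdd_workflow_py ready_tasks)

-- ===== LEMMAS AND PROOFS =====

-- The composite sort key of B, as a lexicographic pair (injective in its second component).
def tddKey (t : String) : Lex (Bool × String) :=
  toLex (!(PySem.Str.startswith t "test_"), t)

theorem tddKey_injective : Function.Injective tddKey := by
  intro a b h
  simpa [tddKey] using congrArg (fun p => (ofLex p).2) h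

-- sorted2's boolean comparator is exactly strict order on tddKey.
theorem before_eq_tddKey (a b : String) :
    (decide ((!(PySem.Str.startswith a "test_")) < (!(PySem.Str.startswith b "test_"))) ||
      (!decide ((!(PySem.Str.startswith b "test_")) < (!(PySem.Str.startswith a "test_"))) &&
        decide (a < b))) = decide (tddKey a < tddKey b) := by
  cases hx : PySem.Str.startswith a "test_" <;> cases hy : PySem.Str.startswith b "test_" <;>
    simp only [tddKey, hx, hy] <;> simp [Prod.Lex.lt_iff]

-- B's port is a foldl of insertBy keyed by tddKey.
theorem alt_eq_foldl (ready_tasks : List String) :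
    prioritize_tdd_workflow_py_alt ready_tasks =
      ready_tasks.foldl
        (fun acc x => PySem.List.insertBy (fun a b => decide (tddKey a < tddKey b)) x acc) [] := by
  have h : (fun a b : String =>
      decide ((!(PySem.Str.startswith a "test_")) < (!(PySem.Str.startswith b "test_"))) ||
        (!decide ((!(PySem.Str.startswith b "test_")) < (!(PySem.Str.startswith a "test_"))) &&
          decide (a < b)))
      = fun a b => decide (tddKey a < tddKey b) := by
    funext a b; exact before_eq_tddKey a b
  simp only [prioritize_tdd_workflow_py_alt, PySem.List.sorted2, if_neg (by decide : ¬ (false = true))]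
  rw [h]

theorem foldl_insertBy_pairwise {α κ : Type} [LinearOrder κ] (key : α → κ)
    (xs : List α) (acc : List α)
    (h : acc.Pairwise (fun a b => key a ≤ key b)) :
    (xs.foldl (fun acc x => PySem.List.insertBy (fun a b => decide (key a < key b)) x acc) acc).Pairwise
      (fun a b => key a ≤ key b) := by
  induction xs generalizing acc with
  | nil => simpa using h
  | cons x xs ih =>
      simp only [List.foldl_cons]
      exact ih _ (PySem.List.insertBy_pairwise_le key x acc h)

theorem alt_perm (ready_tasks : List String) :
    (prioritize_tdd_workflow_py_alt ready_tasks).Perm ready_tasks :=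
  PySem.List.sorted2_perm ready_tasks _ _ false

theorem a_perm (ready_tasks : List String) :
    (prioritize_tdd_workflow_py ready_tasks).Perm ready_tasks := by
  unfold prioritize_tdd_workflow_py
  simp only []
  refine List.Perm.trans (List.Perm.append ?_ ?_)
    (List.filter_append_perm (fun task_id => PySem.Str.startswith task_id "test_") ready_tasks)
  · simpa using PySem.List.sorted_perm (ready_tasks.filter (fun t => PySem.Str.startswith t "test_")) (fun x => x) false
  · exact PySem.List.sorted_perm _ (fun x => x) false

theorem a_pairwise (ready_tasks : List String) :
    (prioritize_tdd_workflow_py ready_tasks).Pairwise (fun a b => tddKey a ≤ tddKey b) := by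
  unfold prioritize_tdd_workflow_py
  simp only [List.nil_append]
  rw [List.pairwise_append]
  refine ⟨?_, ?_, ?_⟩
  · refine (PySem.List.sorted_pairwise _ (fun x => x)).imp_of_mem ?_
    intro a b ha hb hab
    have ha' := (List.mem_filter.mp ((PySem.List.mem_sorted _ _ _ _).mp ha)).2
    have hb' := (List.mem_filter.mp ((PySem.List.mem_sorted _ _ _ _).mp hb)).2
    simp only [tddKey, ha', hb', Bool.not_true]
    exact Prod.Lex.le_iff.mpr (Or.inr ⟨rfl, hab⟩)
  · refine (PySem.List.sorted_pairwise _ (fun x => x)).imp_of_mem ?_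
    intro a b ha hb hab
    have ha' := (List.mem_filter.mp ((PySem.List.mem_sorted _ _ _ _).mp ha)).2
    have hb' := (List.mem_filter.mp ((PySem.List.mem_sorted _ _ _ _).mp hb)).2
    simp only [tddKey, ha', hb']
    exact Prod.Lex.le_iff.mpr (Or.inr ⟨rfl, hab⟩)
  · intro a ha b hb
    have ha' := (List.mem_filter.mp ((PySem.List.mem_sorted _ _ _ _).mp ha)).2
    have hb' := (List.mem_filter.mp ((PySem.List.mem_sorted _ _ _ _).mp hb)).2
    simp only [tddKey, ha', hb', Bool.not_true]
    exact Prod.Lex.le_iff.mpr (Or.inl (show (false : Bool) < true by decide))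

theorem alt_pairwise (ready_tasks : List String) :
    (prioritize_tdd_workflow_py_alt ready_tasks).Pairwise (fun a b => tddKey a ≤ tddKey b) := by
  rw [alt_eq_foldl]
  exact foldl_insertBy_pairwise tddKey ready_tasks [] (by simp)

-- ===== VERDICT (by name: the statement is the Claim_ definition above) =====
theorem prioritize_tdd_workflow_py_spec : Claim_equal_prioritize_tdd_workflow_py := by
  intro ready_tasks _
  unfold Spec_prioritize_tdd_workflow_py
  exact PySem.List.eq_of_perm_of_pairwise_le_of_injective tddKey tddKey_injective
    ((a_perm ready_tasks).trans (alt_perm ready_tasks).symm)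
    (a_pairwise ready_tasks) (alt_pairwise ready_tasks)
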